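-- pv_equiv track=rewrite | github.com/MohamedAklamaash/DSA_CP | Arrays/mindurationof01and1.py | min_game_duration
-- ===== SOURCE A (Python) =====
-- def min_game_duration(binary_string):
--     n = len(binary_string)
--     total_duration = 0
--     next_position = n - 1  # Next available position for a '1' (starting from the rightmost)
--
--     # Traverse the string from right to left
--     for i in range(n - 1, -1, -1):
--         if binary_string[i] == '1':
--             # Add selection time (1 second) and movement time
--             total_duration += 1 + (next_position - i)
--             next_position -= 1  # Update the next available position for the next '1'
--
--     return total_duration
-- ===== SOURCE B (Python) =====
-- def min_game_duration(binary_string):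
--     n = len(binary_string)
--     m = 0
--     s = 0
--     for i, ch in enumerate(binary_string):
--         if ch == '1':
--             m += 1
--             s += i
--     return m + m * (n - 1) - m * (m - 1) // 2 - s
-- ===== Notes on version B (the rewrite author's own statement) =====
-- stated objective: alternative
-- what changed: Replaces the right-to-left simulation with a decrementing next_position pointer by a single left-to-right pass that counts the ones m and sums their indices s, returning the closed form m + m*(n-1) - m*(m-1)//2 - s.
import Mathlib
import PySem

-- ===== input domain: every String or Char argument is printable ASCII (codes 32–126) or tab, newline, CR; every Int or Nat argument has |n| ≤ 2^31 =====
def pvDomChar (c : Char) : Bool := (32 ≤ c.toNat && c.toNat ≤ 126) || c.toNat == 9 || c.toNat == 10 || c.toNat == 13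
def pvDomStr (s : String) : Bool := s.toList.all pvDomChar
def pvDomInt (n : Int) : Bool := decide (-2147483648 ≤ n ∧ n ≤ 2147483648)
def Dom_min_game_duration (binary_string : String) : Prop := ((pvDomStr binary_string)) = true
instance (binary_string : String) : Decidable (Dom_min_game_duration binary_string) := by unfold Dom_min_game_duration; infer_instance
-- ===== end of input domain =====

-- B replaces A's right-to-left movement simulation by a one-pass count/index-sum and a closed-form total (alternative algorithm, same cost; return value only).

-- ===== PORT A =====
-- right-to-left loop over range(n-1,-1,-1) with state (total_duration, next_position)
def min_game_duration (binary_string : String) : Int :=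
  let n : Int := PySem.Str.len binary_string
  let st :=
    (PySem.List.pyRange (n - 1) (-1) (-1)).foldl
      (fun (st : Int × Int) i =>
        if PySem.Str.pyGet? binary_string i = some '1' then
          (st.1 + (1 + (st.2 - i)), st.2 - 1)
        else st)
      (0, n - 1)
  st.1

-- ===== PORT B =====
-- one pass over enumerate(binary_string) accumulating (m, s), then the closed form
def min_game_duration_alt (binary_string : String) : Int :=
  let n : Int := PySem.Str.len binary_string
  let ms :=
    (PySem.List.enumerate binary_string.toList 0).foldl
      (fun (ms : Int × Int) p =>
        if p.2 = '1' then (ms.1 + 1, ms.2 + p.1) else ms)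
      (0, 0)
  ms.1 + ms.1 * (n - 1) - PySem.Int.floordiv (ms.1 * (ms.1 - 1)) 2 - ms.2

-- ===== PRECONDITION & SPEC =====
def Spec_min_game_duration (binary_string : String) (out : Int) : Prop := out = min_game_duration_alt binary_string
instance (binary_string : String) (out : Int) : Decidable (Spec_min_game_duration binary_string out) := by unfold Spec_min_game_duration; infer_instance

-- ===== CLAIM (what is proved, stated in full; the proofs are below) =====
def Claim_equal_min_game_duration : Prop := ∀ (binary_string : String), Dom_min_game_duration binary_string → Spec_min_game_duration binary_string (min_game_duration binary_string)

-- ===== LEMMAS AND PROOFS =====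

-- count of '1' in a list
def pvOnes : List Char → Nat
  | [] => 0
  | c :: cs => (if c = '1' then 1 else 0) + pvOnes cs

-- sum of (local, zero-based) indices at which '1' occurs
def pvWsum : List Char → Int
  | [] => 0
  | _ :: cs => (pvOnes cs : Int) + pvWsum cs

-- (count, index-sum) of '1' among indices < j of cs
def pvStats (cs : List Char) : Nat → Nat × Int
  | 0 => (0, 0)
  | j + 1 =>
    let p := pvStats cs j
    if cs.getD j ' ' = '1' then (p.1 + 1, p.2 + j) else p

-- triangular number Σ_{k<m} k
def pvTri : Nat → Int
  | 0 => 0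
  | m + 1 => pvTri m + m

lemma pvTri_eq (m : Nat) : pvTri m = PySem.Int.floordiv ((m : Int) * ((m : Int) - 1)) 2 := by
  have h2 : (0 : Int) < 2 := by norm_num
  rw [eq_comm, PySem.Int.floordiv_eq_iff_of_pos h2]
  have : 2 * pvTri m = (m : Int) * ((m : Int) - 1) := by
    induction m with
    | zero => simp [pvTri]
    | succ k ih => simp [pvTri]; ring_nf; ring_nf at ih; omega
  omega

lemma pvStats_cons (c : Char) (cs : List Char) (j : Nat) :
    pvStats (c :: cs) (j + 1) =
      ((if c = '1' then 1 else 0) + (pvStats cs j).1, (pvStats cs j).2 + (pvStats cs j).1) := by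
  induction j with
  | zero => simp [pvStats]; split <;> simp
  | succ k ih =>
    show (let p := pvStats (c :: cs) (k + 1);
      if (c :: cs).getD (k + 1) ' ' = '1' then (p.1 + 1, p.2 + (k + 1)) else p) = _
    rw [ih]
    have hg : (c :: cs).getD (k + 1) ' ' = cs.getD k ' ' := by simp [List.getD]
    rw [hg]
    by_cases h : cs.getD k ' ' = '1'
    · simp only [h, if_pos, pvStats, Prod.mk.injEq]
      constructor
      · omega
      · push_cast
        ring
    · simp only [h, ite_false, pvStats]

lemma pvStats_full (cs : List Char) : pvStats cs cs.length = (pvOnes cs, pvWsum cs) := by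
  induction cs with
  | nil => simp [pvStats, pvOnes, pvWsum]
  | cons c cs ih =>
    show pvStats (c :: cs) (cs.length + 1) = _
    rw [pvStats_cons, ih, pvOnes, pvWsum]
    by_cases h : c = '1' <;> simp [h] <;> push_cast <;> ring

-- A's loop, characterised: fold over [j-1, …, 0] from state (t, p)
lemma pvFoldA (cs : List Char) (j : Nat) (hj : j ≤ cs.length) (t p : Int) :
    (PySem.List.pyRange ((j : Int) - 1) (-1) (-1)).foldl
      (fun (st : Int × Int) i =>
        if PySem.List.pyGet? cs i = some '1' then (st.1 + (1 + (st.2 - i)), st.2 - 1) else st)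
      (t, p)
    = (t + ((pvStats cs j).1 : Int) + ((pvStats cs j).1 : Int) * p
        - pvTri (pvStats cs j).1 - (pvStats cs j).2,
       p - ((pvStats cs j).1 : Int)) := by
  induction j generalizing t p with
  | zero =>
    rw [PySem.List.pyRange_neg_one_eq_nil (by norm_num)]
    simp [pvStats, pvTri]
  | succ k ih =>
    have hk : k < cs.length := hj
    have hget : PySem.List.pyGet? cs ((k : Int)) = cs[k]? := PySem.List.pyGet?_natCast cs k
    have hgetE : cs[k]? = some cs[k] := List.getElem?_eq_getElem hk
    have hcond : (PySem.List.pyGet? cs ((k : Int)) = some '1') ↔ cs.getD k ' ' = '1' := by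
      rw [hget, hgetE, List.getD, hgetE]; simp
    push_cast
    rw [show ((k : Int) + 1 - 1) = (k : Int) by ring,
        show PySem.List.pyRange ((k : Int)) (-1) (-1)
           = ((k : Int)) :: PySem.List.pyRange ((k : Int) - 1) (-1) (-1) from
          PySem.List.pyRange_neg_one_cons (by omega)]
    simp only [List.foldl_cons]
    by_cases h : cs.getD k ' ' = '1'
    · rw [if_pos (hcond.mpr h)]
      rw [ih (le_of_lt hk)]
      simp only [pvStats, h, if_pos, pvTri, Prod.mk.injEq]
      push_cast
      constructor <;> ring
    · rw [if_neg (fun hc => h (hcond.mp hc))]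
      rw [ih (le_of_lt hk)]
      simp only [pvStats, h, ite_false]

-- B's loop, characterised: fold over enumerate cs k from state (m, s)
lemma pvFoldB (cs : List Char) (k m s : Int) :
    (PySem.List.enumerate cs k).foldl
      (fun (ms : Int × Int) p => if p.2 = '1' then (ms.1 + 1, ms.2 + p.1) else ms)
      (m, s)
    = (m + (pvOnes cs : Int), s + k * (pvOnes cs : Int) + pvWsum cs) := by
  induction cs generalizing k m s with
  | nil => simp [PySem.List.enumerate_nil, pvOnes, pvWsum]
  | cons c cs ih =>
    rw [PySem.List.enumerate_cons]
    simp only [List.foldl_cons]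
    by_cases h : c = '1'
    · rw [if_pos h, ih, pvOnes, pvWsum]
      simp [h]; push_cast; constructor <;> ring
    · rw [if_neg h, ih, pvOnes, pvWsum]
      simp [h]; push_cast; ring

-- combined characterisation, stated over the underlying char list
lemma pvMain (cs : List Char) :
    ((PySem.List.pyRange ((cs.length : Int) - 1) (-1) (-1)).foldl
      (fun (st : Int × Int) i =>
        if PySem.List.pyGet? cs i = some '1' then (st.1 + (1 + (st.2 - i)), st.2 - 1) else st)
      (0, (cs.length : Int) - 1)).1
    =
    (let ms :=
      (PySem.List.enumerate cs 0).foldl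
        (fun (ms : Int × Int) p => if p.2 = '1' then (ms.1 + 1, ms.2 + p.1) else ms)
        (0, 0)
     ms.1 + ms.1 * ((cs.length : Int) - 1) - PySem.Int.floordiv (ms.1 * (ms.1 - 1)) 2 - ms.2) := by
  rw [pvFoldA cs cs.length le_rfl 0 ((cs.length : Int) - 1)]
  rw [pvFoldB cs 0 0 0]
  rw [pvStats_full]
  simp only
  simp only [zero_add, zero_mul, add_zero]
  rw [← pvTri_eq]

-- ===== VERDICT (by name: the statement is the Claim_ definition above) =====
theorem min_game_duration_spec : Claim_equal_min_game_duration := by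
  intro s _
  show min_game_duration s = min_game_duration_alt s
  exact pvMain s.toList
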